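-- pv_equiv track=rewrite | github.com/Adityavasudev2006/ForInsighter | backend/utils/chunker.py | _split_with_separators
-- ===== SOURCE A (Python) =====
-- SEPARATORS = ["\n\n", "\n", ". ", " "]
--
-- def _split_with_separators(text: str, chunk_size: int) -> list[str]:
--     pieces = [text.strip()]
--     for separator in SEPARATORS:
--         next_pieces: list[str] = []
--         for piece in pieces:
--             if len(piece) <= chunk_size:
--                 next_pieces.append(piece)
--                 continue
--             split_piece = piece.split(separator)
--             for idx, part in enumerate(split_piece):
--                 part = part.strip()
--                 if not part:
--                     continue
--                 suffix = ". " if separator == ". " and idx < len(split_piece) - 1 else ""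
--                 next_pieces.append(f"{part}{suffix}".strip())
--         pieces = next_pieces
--     return [piece for piece in pieces if piece]
-- ===== SOURCE B (Python) =====
-- SEPARATORS = ["\n\n", "\n", ". ", " "]
--
-- def _split_with_separators(text: str, chunk_size: int) -> list[str]:
--     def split(piece: str, i: int) -> list[str]:
--         if i == len(SEPARATORS) or len(piece) <= chunk_size:
--             return [piece]
--         sep = SEPARATORS[i]
--         parts = piece.split(sep)
--         out: list[str] = []
--         for idx, part in enumerate(parts):
--             part = part.strip()
--             if not part:
--                 continue
--             if sep == ". " and idx < len(parts) - 1: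
--                 part = f"{part}. ".strip()
--             out.extend(split(part, i + 1))
--         return out
--     return [p for p in split(text.strip(), 0) if p]
-- ===== Notes on version B (the rewrite author's own statement) =====
-- stated objective: alternative
-- what changed: Replaces A's level-by-level outer loop over the separator list (rebuilding the whole pieces list at each level) with a depth-first recursive helper that splits one piece and recurses into each part with the next separator, concatenating results in order.
import Mathlib
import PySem

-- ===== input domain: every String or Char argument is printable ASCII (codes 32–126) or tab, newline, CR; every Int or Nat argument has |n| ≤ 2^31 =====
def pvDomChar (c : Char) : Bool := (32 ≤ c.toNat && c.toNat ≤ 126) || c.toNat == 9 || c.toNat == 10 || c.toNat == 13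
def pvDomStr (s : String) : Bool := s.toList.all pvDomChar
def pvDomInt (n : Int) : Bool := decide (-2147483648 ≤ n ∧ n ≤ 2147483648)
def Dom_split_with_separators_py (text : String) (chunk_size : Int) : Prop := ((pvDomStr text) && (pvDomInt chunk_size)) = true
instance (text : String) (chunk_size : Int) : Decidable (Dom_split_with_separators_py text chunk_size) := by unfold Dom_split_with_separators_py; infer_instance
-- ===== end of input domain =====

set_option maxHeartbeats 1000000


-- B replaces A's level-by-level loop over the separator list with depth-first recursion
-- over the separator hierarchy (objective: alternative decomposition; same values, same order).

-- str.split(sep): exact for the nonempty separator literals used here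
-- (PySem.Str.split? is none only for sep = "", where Python raises; SEPARATORS has no "").
def pySplit (s sep : String) : List String := (PySem.Str.split? s sep).getD [s]

def SEPARATORS_L : List String := ["\n\n", "\n", ". ", " "]

-- ===== PORT A =====
-- body of A's 'for piece in pieces' loop: appends this piece's contribution to next_pieces
def aPieceStep (chunk_size : Int) (separator : String) (next_pieces : List String) (piece : String) : List String :=
  if PySem.Str.len piece ≤ chunk_size then next_pieces ++ [piece]
  else
    let split_piece := pySplit piece separator
    (PySem.List.enumerate split_piece).foldl (fun acc ip =>
      let part := PySem.Str.strip ip.2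
      if part = "" then acc
      else
        let suffix := if separator = ". " ∧ ip.1 < (split_piece.length : Int) - 1 then ". " else ""
        acc ++ [PySem.Str.strip (part ++ suffix)]) next_pieces

def split_with_separators_py (text : String) (chunk_size : Int) : List String :=
  let pieces := SEPARATORS_L.foldl
    (fun pieces separator => pieces.foldl (aPieceStep chunk_size separator) []) [PySem.Str.strip text]
  pieces.filter (fun p => p ≠ "")

-- ===== PORT B =====
-- Source B's recursive split(piece, i); the index i into SEPARATORS is represented by the
-- remaining suffix of the separator list (structural recursion on it).
def bSplit (chunk_size : Int) : List String → String → List String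
  | [], piece => [piece]
  | sep :: rest, piece =>
    if PySem.Str.len piece ≤ chunk_size then [piece]
    else
      let parts := pySplit piece sep
      (PySem.List.enumerate parts).foldl (fun out ip =>
        let part := PySem.Str.strip ip.2
        if part = "" then out
        else
          let part := if sep = ". " ∧ ip.1 < (parts.length : Int) - 1
                      then PySem.Str.strip (part ++ ". ") else part
          out ++ bSplit chunk_size rest part) []

def split_with_separators_py_alt (text : String) (chunk_size : Int) : List String :=
  (bSplit chunk_size SEPARATORS_L (PySem.Str.strip text)).filter (fun p => p ≠ "")

-- ===== PRECONDITION & SPEC =====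
def Spec_split_with_separators_py (text : String) (chunk_size : Int) (out : List String) : Prop := out = split_with_separators_py_alt text chunk_size
instance (text : String) (chunk_size : Int) (out : List String) : Decidable (Spec_split_with_separators_py text chunk_size out) := by unfold Spec_split_with_separators_py; infer_instance

-- ===== CLAIM (what is proved, stated in full; the proofs are below) =====
def Claim_equal_split_with_separators_py : Prop := ∀ (text : String) (chunk_size : Int), Dom_split_with_separators_py text chunk_size → Spec_split_with_separators_py text chunk_size (split_with_separators_py text chunk_size)

-- ===== LEMMAS AND PROOFS =====

theorem dw_idem {α : Type} (p : α → Bool) (l : List α) :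
    List.dropWhile p (List.dropWhile p l) = List.dropWhile p l := by
  rw [List.dropWhile_eq_self_iff]
  intro hl
  have h := List.head?_dropWhile_not p l
  cases hh : (List.dropWhile p l).head? with
  | none =>
    rw [List.head?_eq_none_iff] at hh
    rw [hh] at hl; simp at hl
  | some x =>
    rw [hh] at h
    have hx : (List.dropWhile p l)[0] = x := by
      obtain ⟨t, ht⟩ := List.head?_eq_some_iff.mp hh
      simp [ht]
    rw [hx]; simp [h]

theorem lstrip_rstrip_lstrip (s : List Char) :
    PySem.Chars.lstrip (PySem.Chars.rstrip (PySem.Chars.lstrip s)) = PySem.Chars.rstrip (PySem.Chars.lstrip s) := by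
  simp only [PySem.Chars.lstrip, PySem.Chars.rstrip]
  set p := PySem.Chars.isspace with hp
  set y := List.dropWhile p s with hy
  rw [List.dropWhile_eq_self_iff]
  intro hl
  have hpre : (List.dropWhile p y.reverse).reverse <+: y := by
    have h1 : List.dropWhile p y.reverse <:+ y.reverse := List.dropWhile_suffix p
    have h2 := List.reverse_prefix.mpr h1
    simpa using h2
  have hylen : 0 < y.length := lt_of_lt_of_le hl hpre.length_le
  have h0 : (List.dropWhile p y.reverse).reverse[0] = y[0]'hylen := hpre.getElem hl
  rw [h0]
  have h2 := dw_idem p s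
  rw [List.dropWhile_eq_self_iff] at h2
  exact h2 hylen

theorem strip_idem (s : List Char) :
    PySem.Chars.strip (PySem.Chars.strip s) = PySem.Chars.strip s := by
  simp only [PySem.Chars.strip]
  rw [lstrip_rstrip_lstrip]
  simp only [PySem.Chars.rstrip, PySem.Chars.lstrip]
  rw [List.reverse_reverse, dw_idem]

theorem str_strip_idem (s : String) : PySem.Str.strip (PySem.Str.strip s) = PySem.Str.strip s := by
  apply String.toList_inj.mp
  rw [PySem.Str.toList_strip, PySem.Str.toList_strip, strip_idem]

-- generic loop shape: 'if q(x): continue else out += g(x)'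
theorem foldl_if_append {α β : Type} (q : α → Prop) [DecidablePred q] (g : α → List β)
    (l : List α) (acc : List β) :
    l.foldl (fun acc x => if q x then acc else acc ++ g x) acc
      = acc ++ l.flatMap (fun x => if q x then [] else g x) := by
  have hbody : (fun (acc : List β) x => if q x then acc else acc ++ g x)
      = fun acc x => acc ++ (if q x then [] else g x) := by
    funext a x; split_ifs <;> simp
  rw [hbody, PySem.List.foldl_append_eq_flatMap]

-- the chunk A emits for one piece at one level, in flatMap form
def emitA (chunk_size : Int) (separator : String) (piece : String) : List String :=
  if PySem.Str.len piece ≤ chunk_size then [piece]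
  else
    (PySem.List.enumerate (pySplit piece separator)).flatMap (fun ip =>
      if PySem.Str.strip ip.2 = "" then []
      else [PySem.Str.strip (PySem.Str.strip ip.2 ++
        (if separator = ". " ∧ ip.1 < ((pySplit piece separator).length : Int) - 1 then ". " else ""))])

theorem aPieceStep_eq (cs : Int) (sep : String) (acc : List String) (piece : String) :
    aPieceStep cs sep acc piece = acc ++ emitA cs sep piece := by
  unfold aPieceStep emitA
  split_ifs with h
  · rfl
  · simp only []
    exact foldl_if_append (fun ip : Int × String => PySem.Str.strip ip.2 = "")
      (fun ip => [PySem.Str.strip (PySem.Str.strip ip.2 ++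
        (if sep = ". " ∧ ip.1 < ((pySplit piece sep).length : Int) - 1 then ". " else ""))])
      (PySem.List.enumerate (pySplit piece sep)) acc

theorem level_eq (cs : Int) (sep : String) (pieces : List String) :
    pieces.foldl (aPieceStep cs sep) [] = pieces.flatMap (emitA cs sep) := by
  have h : aPieceStep cs sep = (fun acc p => acc ++ emitA cs sep p) := by
    funext a p; exact aPieceStep_eq cs sep a p
  rw [h, PySem.List.foldl_append_eq_flatMap, List.nil_append]

-- bSplit's cons case, in flatMap form
theorem bSplit_cons (cs : Int) (sep : String) (rest : List String) (piece : String) :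
    bSplit cs (sep :: rest) piece =
      if PySem.Str.len piece ≤ cs then [piece]
      else
        (PySem.List.enumerate (pySplit piece sep)).flatMap (fun ip =>
          if PySem.Str.strip ip.2 = "" then []
          else bSplit cs rest
            (if sep = ". " ∧ ip.1 < ((pySplit piece sep).length : Int) - 1
             then PySem.Str.strip (PySem.Str.strip ip.2 ++ ". ") else PySem.Str.strip ip.2)) := by
  rw [bSplit]
  split_ifs with h
  · rfl
  · simp only []
    exact (foldl_if_append (fun ip : Int × String => PySem.Str.strip ip.2 = "")
      (fun ip => bSplit cs rest
        (if sep = ". " ∧ ip.1 < ((pySplit piece sep).length : Int) - 1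
         then PySem.Str.strip (PySem.Str.strip ip.2 ++ ". ") else PySem.Str.strip ip.2))
      (PySem.List.enumerate (pySplit piece sep)) []).trans (List.nil_append _)

theorem bSplit_short (cs : Int) (seps : List String) (piece : String)
    (h : PySem.Str.len piece ≤ cs) : bSplit cs seps piece = [piece] := by
  cases seps with
  | nil => rfl
  | cons sep rest => rw [bSplit, if_pos h]

theorem emitA_flatMap_bSplit (cs : Int) (sep : String) (rest : List String) (piece : String) :
    (emitA cs sep piece).flatMap (bSplit cs rest) = bSplit cs (sep :: rest) piece := by
  rw [bSplit_cons, emitA]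
  split_ifs with h
  · simp [bSplit_short cs rest piece h]
  · rw [List.flatMap_assoc]
    congr 1
    funext ip
    by_cases hp : PySem.Str.strip ip.2 = ""
    · simp [hp]
    · simp only [hp, if_false]
      by_cases hq : sep = ". " ∧ ip.1 < ((pySplit piece sep).length : Int) - 1
      · rcases hq with ⟨h1, h2⟩; subst h1; simp [h2]
      · simp only [hq, if_false, String.append_empty, List.flatMap_cons, List.flatMap_nil,
          List.append_nil]
        rw [str_strip_idem]

theorem levels_eq_bSplit (cs : Int) (seps : List String) (pieces : List String) :
    seps.foldl (fun pieces sep => pieces.foldl (aPieceStep cs sep) []) pieces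
      = pieces.flatMap (bSplit cs seps) := by
  induction seps generalizing pieces with
  | nil => simp [bSplit]
  | cons sep rest ih =>
    rw [List.foldl_cons, ih, level_eq, List.flatMap_assoc]
    congr 1
    funext p
    exact emitA_flatMap_bSplit cs sep rest p

-- ===== VERDICT (by name: the statement is the Claim_ definition above) =====
theorem split_with_separators_py_spec : Claim_equal_split_with_separators_py := by
  intro text cs _
  unfold Spec_split_with_separators_py
  simp only [split_with_separators_py, split_with_separators_py_alt, levels_eq_bSplit]
  simp
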